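-- pv_equiv track=rewrite | github.com/haylibi/first_steps | Programming1_Exercises/Answers.py | certas
-- ===== SOURCE A (Python) =====
-- def certas(chave, tentativa):
--     if len(chave)!=len(tentativa):
--         raise ValueError('Chave e tentativa tem de ter o mesmo numero de caracteres')
--     a={}
--     b={}
--     c=0
--     for i in range(len(chave)):
--         b[chave[i]]=1+b.get(chave[i],0)
--         a[tentativa[i]]=1+a.get(tentativa[i],0)
--     for i in a.keys():
--         c=c+min(a[i],b.get(i,0))
--     return c
-- ===== SOURCE B (Python) =====
-- def certas(chave, tentativa):
--     if len(chave) != len(tentativa):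
--         raise ValueError('Chave e tentativa tem de ter o mesmo numero de caracteres')
--     xs = sorted(chave)
--     ys = sorted(tentativa)
--     i = j = c = 0
--     while i < len(xs) and j < len(ys):
--         if xs[i] == ys[j]:
--             c += 1
--             i += 1
--             j += 1
--         elif xs[i] < ys[j]:
--             i += 1
--         else:
--             j += 1
--     return c
-- ===== Notes on version B (the rewrite author's own statement) =====
-- stated objective: alternative
-- what changed: Replaces the two hash-histograms plus a min-over-keys pass by sorting both strings and counting common characters with a single two-pointer merge scan.
import Mathlib
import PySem

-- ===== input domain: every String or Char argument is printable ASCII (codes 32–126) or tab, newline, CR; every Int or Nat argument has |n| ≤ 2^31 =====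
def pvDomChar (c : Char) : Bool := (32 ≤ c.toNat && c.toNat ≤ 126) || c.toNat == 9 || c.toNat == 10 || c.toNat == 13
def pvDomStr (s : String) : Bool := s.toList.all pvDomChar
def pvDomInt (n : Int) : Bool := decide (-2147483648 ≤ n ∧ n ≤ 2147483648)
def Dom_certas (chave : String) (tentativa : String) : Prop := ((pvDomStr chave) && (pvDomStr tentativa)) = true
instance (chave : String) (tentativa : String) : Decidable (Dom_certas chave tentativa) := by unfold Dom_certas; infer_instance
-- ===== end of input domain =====

-- B replaces A's two hash-histograms + min-over-keys pass by sorting both strings and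
-- counting common characters with a single two-pointer merge (alternative algorithm, not faster).

-- ===== PORT A =====
-- Python A: one indexed loop builds the counters b (of chave, = s.1) and a (of tentativa, = s.2),
-- then a second loop sums min(a[k], b.get(k, 0)) over a's keys.
-- a[k] is ported as getD k 0: k ranges over a's keys, so Python's KeyError branch is unreachable.
def certas (chave : String) (tentativa : String) : Int :=
  let cl := chave.toList
  let tl := tentativa.toList
  let ab := (PySem.List.pyRange 0 (PySem.Str.len chave) 1).foldl
      (fun (s : PySem.Dict Char Int × PySem.Dict Char Int) i =>
        (s.1.insert (PySem.List.pyGetD cl i ' ') (1 + s.1.getD (PySem.List.pyGetD cl i ' ') 0),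
         s.2.insert (PySem.List.pyGetD tl i ' ') (1 + s.2.getD (PySem.List.pyGetD tl i ' ') 0)))
      (PySem.Dict.empty, PySem.Dict.empty)
  (PySem.Dict.keys ab.2).foldl
      (fun c k => c + min (PySem.Dict.getD ab.2 k 0) (PySem.Dict.getD ab.1 k 0)) 0

-- ===== PORT B =====
-- the two-pointer while loop of Source B, as recursion on the two (sorted) suffixes
def certasMerge : List Char → List Char → Int
  | [], _ => 0
  | _ :: _, [] => 0
  | x :: xs, y :: ys =>
    if x = y then 1 + certasMerge xs ys
    else if x < y then certasMerge xs (y :: ys)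
    else certasMerge (x :: xs) ys
  termination_by xs ys => xs.length + ys.length
  decreasing_by all_goals (simp; try omega)

def certas_alt (chave : String) (tentativa : String) : Int :=
  certasMerge (PySem.List.sorted chave.toList (fun x => x) false)
              (PySem.List.sorted tentativa.toList (fun x => x) false)

-- ===== PRECONDITION & SPEC =====
-- Pre_ excludes exactly the inputs of unequal length, on which A raises ValueError (B raises it too).
def Pre_certas (chave : String) (tentativa : String) : Prop :=
  chave.toList.length = tentativa.toList.length
instance (chave : String) (tentativa : String) : Decidable (Pre_certas chave tentativa) := by
  unfold Pre_certas; infer_instance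
def pvWitness_certas : String × String := ("abca", "bacd")

def Spec_certas (chave : String) (tentativa : String) (out : Int) : Prop := out = certas_alt chave tentativa
instance (chave : String) (tentativa : String) (out : Int) : Decidable (Spec_certas chave tentativa out) := by unfold Spec_certas; infer_instance

-- ===== CLAIM (what is proved, stated in full; the proofs are below) =====
def Claim_equal_certas : Prop := ∀ (chave : String) (tentativa : String), Dom_certas chave tentativa → Pre_certas chave tentativa → Spec_certas chave tentativa (certas chave tentativa)

-- ===== LEMMAS AND PROOFS =====

-- A's counting loop builds collections.Counter (modulo 1 + x vs x + 1)
lemma counter_loop (l : List Char) :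
    l.foldl (fun (d : PySem.Dict Char Int) x => d.insert x (1 + d.getD x 0)) PySem.Dict.empty
      = PySem.Dict.counter l := by
  rw [PySem.List.foldl_congr_mem l _ (fun d x => d.insert x (d.getD x 0 + 1)) _
      (fun acc x _ => by rw [Int.add_comm])]
  exact PySem.Dict.foldl_insert_getD_add_one_eq_counter l

-- A's value: the min-over-keys sum, written through List.count
lemma certas_eq_sum (c t : String) (h : c.toList.length = t.toList.length) :
    certas c t = ((PySem.Set.ofList t.toList).map
      (fun k => ((min (t.toList.count k) (c.toList.count k) : Nat) : Int))).sum := by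
  unfold certas
  dsimp only
  rw [PySem.List.foldl_prod_mk
      (f := fun (d : PySem.Dict Char Int) i =>
        d.insert (PySem.List.pyGetD c.toList i ' ') (1 + d.getD (PySem.List.pyGetD c.toList i ' ') 0))
      (g := fun (d : PySem.Dict Char Int) i =>
        d.insert (PySem.List.pyGetD t.toList i ' ') (1 + d.getD (PySem.List.pyGetD t.toList i ' ') 0))]
  simp only [PySem.Str.len_eq]
  rw [PySem.List.foldl_pyRange_zero_pyGetD' c.toList ' '
      (fun (d : PySem.Dict Char Int) x => d.insert x (1 + d.getD x 0)) PySem.Dict.empty,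
    h,
    PySem.List.foldl_pyRange_zero_pyGetD' t.toList ' '
      (fun (d : PySem.Dict Char Int) x => d.insert x (1 + d.getD x 0)) PySem.Dict.empty,
    counter_loop, counter_loop]
  rw [PySem.List.foldl_add _ _ 0, PySem.Dict.keys_counter]
  simp [PySem.Dict.getD_counter, Nat.cast_min]

-- B's merge count on sorted lists = cardinality of the multiset intersection
lemma certasMerge_eq_card (xs ys : List Char) :
    xs.Pairwise (· ≤ ·) → ys.Pairwise (· ≤ ·) →
    certasMerge xs ys = ((Multiset.card ((xs : Multiset Char) ∩ (ys : Multiset Char))) : Int) := by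
  induction xs, ys using certasMerge.induct with
  | case1 ys => intro _ _; simp [certasMerge, Multiset.zero_inter]
  | case2 x xs => intro _ _; simp [certasMerge, Multiset.inter_zero]
  | case3 xs y ys ih =>
    intro hx hy
    rw [show ((y :: xs : List Char) : Multiset Char) = y ::ₘ (xs : Multiset Char) from rfl,
        show ((y :: ys : List Char) : Multiset Char) = y ::ₘ (ys : Multiset Char) from rfl,
        Multiset.cons_inter_of_pos _ (Multiset.mem_cons_self y _), Multiset.erase_cons_head]
    simp only [certasMerge]
    rw [ih (List.pairwise_cons.mp hx).2 (List.pairwise_cons.mp hy).2]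
    rw [Multiset.card_cons]; push_cast; ring
  | case4 x xs y ys hne hlt ih =>
    intro hx hy
    have hmem : x ∉ ((y :: ys : List Char) : Multiset Char) := by
      simp only [Multiset.mem_coe, List.mem_cons]
      rintro (rfl | hm)
      · exact hne rfl
      · exact absurd ((List.pairwise_cons.mp hy).1 x hm) (not_le.mpr hlt)
    simp only [certasMerge, if_neg hne, if_pos hlt]
    rw [show ((x :: xs : List Char) : Multiset Char) = x ::ₘ (xs : Multiset Char) from rfl,
        Multiset.cons_inter_of_neg _ hmem]
    exact ih (List.pairwise_cons.mp hx).2 hy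
  | case5 x xs y ys hne hge ih =>
    intro hx hy
    have hyx : y < x := lt_of_le_of_ne (not_lt.mp hge) (fun e => hne e.symm)
    have hmem : y ∉ ((x :: xs : List Char) : Multiset Char) := by
      simp only [Multiset.mem_coe, List.mem_cons]
      rintro (rfl | hm)
      · exact hne rfl
      · exact absurd ((List.pairwise_cons.mp hx).1 y hm) (not_le.mpr hyx)
    simp only [certasMerge, if_neg hne, if_neg hge]
    rw [Multiset.inter_comm,
        show ((y :: ys : List Char) : Multiset Char) = y ::ₘ (ys : Multiset Char) from rfl,
        Multiset.cons_inter_of_neg _ hmem, Multiset.inter_comm]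
    exact ih hx (List.pairwise_cons.mp hy).2

-- the min-over-distinct-keys sum IS the multiset-intersection cardinality (Nat form)
lemma sum_min_nat (cl tl : List Char) :
    ((PySem.Set.ofList tl).map (fun k => min (tl.count k) (cl.count k))).sum
      = Multiset.card ((tl : Multiset Char) ∩ (cl : Multiset Char)) := by
  have hnd : (PySem.Set.ofList tl).Nodup := PySem.Set.nodup_ofList tl
  have hfs : (PySem.Set.ofList tl).toFinset = tl.toFinset := by
    apply Finset.ext; intro a
    simp [List.mem_toFinset, PySem.Set.mem_ofList]
  have hsub : ((tl : Multiset Char) ∩ cl).toFinset ⊆ tl.toFinset := by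
    intro a ha
    simp only [Multiset.mem_toFinset] at ha
    simpa [List.mem_toFinset] using Multiset.mem_of_le
      (Multiset.inter_le_left (s := (tl : Multiset Char)) (t := (cl : Multiset Char))) ha
  calc ((PySem.Set.ofList tl).map (fun k => min (tl.count k) (cl.count k))).sum
      = ∑ a ∈ tl.toFinset, min (tl.count a) (cl.count a) := by
        rw [← List.sum_toFinset _ hnd, hfs]
    _ = ∑ a ∈ ((tl : Multiset Char) ∩ cl).toFinset, min (tl.count a) (cl.count a) := by
        refine (Finset.sum_subset hsub ?_).symm
        intro a _ ha
        simp only [Multiset.mem_toFinset, Multiset.mem_inter, Multiset.mem_coe,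
          not_and] at ha
        rcases Nat.eq_zero_or_pos (cl.count a) with h0 | hpos
        · simp [h0]
        · have h1 : a ∈ tl → False := fun hm => ha hm (List.count_pos_iff.mp hpos)
          have h2 : tl.count a = 0 := List.count_eq_zero.mpr (fun hm => h1 hm)
          simp [h2]
    _ = ∑ a ∈ ((tl : Multiset Char) ∩ cl).toFinset, ((tl : Multiset Char) ∩ cl).count a := by
        apply Finset.sum_congr rfl
        intro a _
        simp
    _ = Multiset.card ((tl : Multiset Char) ∩ cl) := Multiset.toFinset_sum_count_eq _

-- the same, with the Int-valued summands A actually adds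
lemma sum_min_eq_card (cl tl : List Char) :
    ((PySem.Set.ofList tl).map
      (fun k => ((min (tl.count k) (cl.count k) : Nat) : Int))).sum
      = ((Multiset.card ((tl : Multiset Char) ∩ (cl : Multiset Char))) : Int) := by
  rw [show (fun k => ((min (tl.count k) (cl.count k) : Nat) : Int))
      = (Nat.cast : Nat → Int) ∘ (fun k => min (tl.count k) (cl.count k)) from rfl,
    ← List.map_map, ← Nat.cast_list_sum, sum_min_nat]

-- ===== VERDICT (by name: the statement is the Claim_ definition above) =====
theorem certas_spec : Claim_equal_certas := by
  intro c t _ hpre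
  unfold Spec_certas certas_alt
  rw [certas_eq_sum c t hpre, sum_min_eq_card,
    certasMerge_eq_card _ _ (PySem.List.sorted_pairwise _ _) (PySem.List.sorted_pairwise _ _)]
  congr 1
  rw [Multiset.coe_eq_coe.mpr (PySem.List.sorted_perm _ _ _),
    Multiset.coe_eq_coe.mpr (PySem.List.sorted_perm _ _ _), Multiset.inter_comm]
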